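-- pv_equiv track=rewrite | github.com/camziny/whiteboard-challenges | scalePrompts/py/archersScore.py | score_archery_tournament
-- ===== SOURCE A (Python) =====
-- def score_archery_tournament(targets_hit):
--     """
--     Calculates the score of an archer in an archery tournament.
--
--     Args:
--       targets_hit: A list of the targets that the archer hit.
--
--     Returns:
--       The archer's score.
--     """
--
--     score = 0
--     seen_targets = set()
--     for target in targets_hit:
--         if target not in seen_targets:
--             score += target
--             seen_targets.add(target)
--     return score
-- ===== SOURCE B (Python) =====
-- def score_archery_tournament(targets_hit):
--     """
--     Calculates the score of an archer in an archery tournament.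
--
--     Args:
--       targets_hit: A list of the targets that the archer hit.
--
--     Returns:
--       The archer's score.
--     """
--     score = 0
--     prev = None
--     for v in sorted(targets_hit):
--         if v != prev:
--             score += v
--             prev = v
--     return score
-- ===== Notes on version B (the rewrite author's own statement) =====
-- stated objective: alternative
-- what changed: Replaces A's hash-set membership dedup by sort-then-scan: sort the targets, then sum each value that differs from its predecessor (duplicates become adjacent after sorting).
import Mathlib
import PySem

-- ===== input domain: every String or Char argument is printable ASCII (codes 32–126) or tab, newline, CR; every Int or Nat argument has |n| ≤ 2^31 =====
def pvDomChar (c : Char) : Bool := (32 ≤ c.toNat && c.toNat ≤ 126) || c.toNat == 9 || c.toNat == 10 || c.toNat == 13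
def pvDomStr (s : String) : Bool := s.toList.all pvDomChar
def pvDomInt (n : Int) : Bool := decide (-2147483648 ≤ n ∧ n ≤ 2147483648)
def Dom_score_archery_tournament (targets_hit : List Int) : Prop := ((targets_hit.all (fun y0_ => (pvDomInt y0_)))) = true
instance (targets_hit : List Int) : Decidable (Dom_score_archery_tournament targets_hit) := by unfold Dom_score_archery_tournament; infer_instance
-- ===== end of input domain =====

-- B replaces A's hash-set single-pass dedup by sort-then-scan (sum values differing from their predecessor): a different algorithm with the same results.

-- ===== PORT A =====
-- score = 0; seen = set(); for target: if target not in seen: score += target; seen.add(target)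
def score_archery_tournament (targets_hit : List Int) : Int :=
  (targets_hit.foldl
    (fun (st : Int × PySem.Set Int) target =>
      if PySem.Set.contains st.2 target then st
      else (st.1 + target, PySem.Set.add st.2 target))
    (0, PySem.Set.empty)).1

-- ===== PORT B =====
-- score = 0; prev = None; for v in sorted(targets_hit): if v != prev: score += v; prev = v
def score_archery_tournament_alt (targets_hit : List Int) : Int :=
  ((PySem.List.sorted targets_hit (fun x => x) false).foldl
    (fun (st : Int × Option Int) v =>
      if some v ≠ st.2 then (st.1 + v, some v) else st)
    (0, none)).1

-- ===== PRECONDITION & SPEC =====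
def Spec_score_archery_tournament (targets_hit : List Int) (out : Int) : Prop := out = score_archery_tournament_alt targets_hit
instance (targets_hit : List Int) (out : Int) : Decidable (Spec_score_archery_tournament targets_hit out) := by unfold Spec_score_archery_tournament; infer_instance

-- ===== CLAIM (what is proved, stated in full; the proofs are below) =====
def Claim_equal_score_archery_tournament : Prop := ∀ (targets_hit : List Int), Dom_score_archery_tournament targets_hit → Spec_score_archery_tournament targets_hit (score_archery_tournament targets_hit)

-- ===== LEMMAS AND PROOFS =====

-- A's loop invariant: the running score tracks the sum of the new elements appended to the seen set.
theorem score_loop_invariant (xs : List Int) : ∀ (s : Int) (seen : PySem.Set Int),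
    (xs.foldl
      (fun (st : Int × PySem.Set Int) target =>
        if PySem.Set.contains st.2 target then st
        else (st.1 + target, PySem.Set.add st.2 target))
      (s, seen)).1
    = s + (PySem.Set.update seen xs).sum - seen.sum := by
  induction xs with
  | nil => intro s seen; simp [PySem.Set.update]
  | cons t ts ih =>
    intro s seen
    simp only [List.foldl_cons, PySem.Set.update_cons]
    by_cases h : t ∈ seen
    · have hc : PySem.Set.contains seen t = true := (PySem.Set.contains_iff _ _).2 h
      rw [if_pos hc, ih, PySem.Set.add_of_mem h]
    · have hc : ¬ PySem.Set.contains seen t = true := fun hk => h ((PySem.Set.contains_iff _ _).1 hk)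
      rw [if_neg hc, ih, PySem.Set.add_of_not_mem h]
      simp [List.sum_append]
      ring

-- Summing over `insert y S` = y plus the sum over `S.erase y`.
theorem sum_insert_erase (y : Int) (S : Finset Int) :
    ∑ x ∈ insert y S, x = y + ∑ x ∈ S.erase y, x := by
  have h : insert y S = insert y (S.erase y) := by
    ext a; simp [Finset.mem_insert, Finset.mem_erase]; tauto
  rw [h, Finset.sum_insert (Finset.notMem_erase y S)]

-- B's scan invariant, prev = some p, p a lower bound of the remaining (sorted) list.
theorem scan_some (ys : List Int) : ∀ (s p : Int), ys.Pairwise (· ≤ ·) → (∀ y ∈ ys, p ≤ y) →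
    ((ys.foldl (fun (st : Int × Option Int) v =>
        if some v ≠ st.2 then (st.1 + v, some v) else st) (s, some p)).1)
    = s + ∑ x ∈ ys.toFinset.erase p, x := by
  induction ys with
  | nil => intro s p _ _; simp
  | cons y rest ih =>
    intro s p hsort hlb
    have hrest : rest.Pairwise (· ≤ ·) := hsort.of_cons
    have hy : ∀ r ∈ rest, y ≤ r := fun r hr => List.rel_of_pairwise_cons hsort hr
    simp only [List.foldl_cons]
    by_cases h : y = p
    · subst h
      rw [if_neg (by simp)]
      rw [ih s y hrest hy]
      congr 1
      simp [List.toFinset_cons, Finset.erase_insert_eq_erase]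
    · have hne : (some y ≠ some p) := by simp [h]
      rw [if_pos hne, ih (s + y) y hrest hy]
      have hpn : p ∉ (y :: rest).toFinset := by
        simp only [List.toFinset_cons, Finset.mem_insert, List.mem_toFinset]
        rintro (rfl | hp)
        · exact h rfl
        · exact h (le_antisymm (hlb y (by simp)) (hy p hp)).symm
      rw [Finset.erase_eq_of_notMem hpn]
      simp only [List.toFinset_cons]
      rw [sum_insert_erase]
      ring
  
-- B's scan with prev = None on a sorted list sums the distinct elements.
theorem scan_none (ys : List Int) (s : Int) (hsort : ys.Pairwise (· ≤ ·)) :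
    ((ys.foldl (fun (st : Int × Option Int) v =>
        if some v ≠ st.2 then (st.1 + v, some v) else st) (s, none)).1)
    = s + ∑ x ∈ ys.toFinset, x := by
  cases ys with
  | nil => simp
  | cons y rest =>
    simp only [List.foldl_cons, if_pos (by simp : (some y ≠ none))]
    rw [scan_some rest (s + y) y hsort.of_cons (fun r hr => List.rel_of_pairwise_cons hsort hr)]
    simp only [List.toFinset_cons]
    rw [sum_insert_erase]
    ring

-- A returns the sum of the distinct elements.
theorem A_eq_finset_sum (xs : List Int) :
    score_archery_tournament xs = ∑ x ∈ xs.toFinset, x := by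
  unfold score_archery_tournament
  rw [score_loop_invariant]
  have hupd : PySem.Set.update PySem.Set.empty xs = PySem.List.dedup xs := rfl
  rw [hupd]
  have hnd : (PySem.List.dedup xs).Nodup := PySem.List.nodup_dedup xs
  have hfs : (PySem.List.dedup xs).toFinset = xs.toFinset := by
    ext a; simp
  have := List.sum_toFinset (fun x : Int => x) hnd
  simp only [hfs] at this
  rw [this]
  simp

-- ===== VERDICT (by name: the statement is the Claim_ definition above) =====
theorem score_archery_tournament_spec : Claim_equal_score_archery_tournament := by
  intro xs _
  unfold Spec_score_archery_tournament score_archery_tournament_alt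
  rw [A_eq_finset_sum, scan_none _ _ (PySem.List.sorted_pairwise xs (fun x => x))]
  have hfs : (PySem.List.sorted xs (fun x => x) false).toFinset = xs.toFinset := by
    ext a; simp [PySem.List.mem_sorted]
  rw [hfs]
  ring
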